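-- pv_equiv track=rewrite | github.com/tran-hong-khanh/prefect-flows-storate | prefectStorate.py | standardized_phonenumbers
-- ===== SOURCE A (Python) =====
-- old_headnumber = ["162","163","164","165","166","167","168","169","123","124","125","127","129","120","121","122","126","128","186","188","199","0162","0163","0164","0165","0166","0167","0168","0169","0123","0124","0125","0127","0129","0120","0121","0122","0126","0128","0186","0188","0199"]
--
-- new_headnumber =["32","33","34","35","36","37","38","39","83","84","85","81","82","70","79","77","76","78","56","58","59", "032","033","034","035","036","037","038","039","083","084","085","081","082","070","079","077","076","078","056","058","059"]
--
-- def standardized_phonenumbers(phone_number):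
--     for index, headnumber in enumerate(old_headnumber):
--         try:
--             if phone_number.index(headnumber) == 0:
--                 phone_number = phone_number.replace(headnumber, new_headnumber[index], 1)
--                 return phone_number
--         except Exception as e:
--             continue
--     return phone_number
-- ===== SOURCE B (Python) =====
-- # B: exploits that every 4-digit old prefix is a zero digit plus a 3-digit old prefix
-- # (and likewise for the new values), so one 21-entry table plus a leading-zero
-- # reduction replaces A's 42-prefix exception-driven scan. Non-str input is returned unchanged, as A's
-- # exception swallowing does.
-- _new_by_old3 = {
--     "162": "32", "163": "33", "164": "34", "165": "35", "166": "36",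
--     "167": "37", "168": "38", "169": "39", "123": "83", "124": "84",
--     "125": "85", "127": "81", "129": "82", "120": "70", "121": "79",
--     "122": "77", "126": "76", "128": "78", "186": "56", "188": "58",
--     "199": "59",
-- }
--
-- def standardized_phonenumbers(phone_number):
--     if not isinstance(phone_number, str):
--         return phone_number
--     if phone_number.startswith("0"):
--         tail = phone_number[1:]
--         v = _new_by_old3.get(tail[:3])
--         return "0" + v + tail[3:] if v is not None else phone_number
--     v = _new_by_old3.get(phone_number[:3])
--     return v + phone_number[3:] if v is not None else phone_number
-- ===== Notes on version B (the rewrite author's own statement) =====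
-- stated objective: simpler
-- what changed: A scans all 42 old prefixes with exception-driven index/replace calls; B keeps one 21-entry three-digit table, strips an optional leading zero digit (every 4-digit prefix is that digit plus a 3-digit one), and does a single dict lookup on the 3-character head.
import Mathlib
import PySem

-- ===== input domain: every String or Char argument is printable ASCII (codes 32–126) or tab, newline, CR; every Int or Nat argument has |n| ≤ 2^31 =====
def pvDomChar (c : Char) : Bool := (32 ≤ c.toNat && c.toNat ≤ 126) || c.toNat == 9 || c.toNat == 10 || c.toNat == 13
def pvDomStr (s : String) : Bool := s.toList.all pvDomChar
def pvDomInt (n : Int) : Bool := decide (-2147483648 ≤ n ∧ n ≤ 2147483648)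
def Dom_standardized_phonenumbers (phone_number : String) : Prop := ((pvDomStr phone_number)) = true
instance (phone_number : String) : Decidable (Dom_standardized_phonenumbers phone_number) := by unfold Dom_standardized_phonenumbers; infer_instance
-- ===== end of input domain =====

-- B (simpler): one 21-entry 3-digit prefix table plus a leading-zero reduction replaces
-- A's 42-prefix exception-driven scan; equivalence of return values is proved below.

set_option maxRecDepth 100000

-- ===== PORT A =====
def pvOld : List (List Char) := [
  ['1', '6', '2'], ['1', '6', '3'], ['1', '6', '4'], ['1', '6', '5'], ['1', '6', '6'], ['1', '6', '7'], ['1', '6', '8'], ['1', '6', '9'], ['1', '2', '3'], ['1', '2', '4'], ['1', '2', '5'], ['1', '2', '7'], ['1', '2', '9'], ['1', '2', '0'], ['1', '2', '1'], ['1', '2', '2'], ['1', '2', '6'], ['1', '2', '8'], ['1', '8', '6'], ['1', '8', '8'], ['1', '9', '9'], ['0', '1', '6', '2'], ['0', '1', '6', '3'], ['0', '1', '6', '4'], ['0', '1', '6', '5'], ['0', '1', '6', '6'], ['0', '1', '6', '7'], ['0', '1', '6', '8'], ['0', '1', '6', '9'], ['0', '1', '2', '3'], ['0', '1', '2', '4'],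 ['0', '1', '2', '5'], ['0', '1', '2', '7'], ['0', '1', '2', '9'], ['0', '1', '2', '0'], ['0', '1', '2', '1'], ['0', '1', '2', '2'], ['0', '1', '2', '6'], ['0', '1', '2', '8'], ['0', '1', '8', '6'], ['0', '1', '8', '8'], ['0', '1', '9', '9']]

def pvNew : List (List Char) := [
  ['3', '2'], ['3', '3'], ['3', '4'], ['3', '5'], ['3', '6'], ['3', '7'], ['3', '8'], ['3', '9'], ['8', '3'], ['8', '4'], ['8', '5'], ['8', '1'], ['8', '2'], ['7', '0'], ['7', '9'], ['7', '7'], ['7', '6'], ['7', '8'], ['5', '6'], ['5', '8'], ['5', '9'], ['0', '3', '2'], ['0', '3', '3'], ['0', '3', '4'], ['0', '3', '5'], ['0', '3', '6'], ['0', '3', '7'], ['0', '3', '8'], ['0', '3', '9'], ['0', '8', '3'], ['0', '8', '4'], ['0', '8', '5'], ['0', '8', '1'], ['0', '8', '2'], ['0', '7', '0'], ['0', '7', '9'], ['0', '7', '7'], ['0', '7', '6'], ['0', '7', '8'], ['0', '5', '6'], ['0', '5', '8'], ['0', '5', '9']]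

-- exact port of phone_number.replace(old, new, 1): splice at the first occurrence
-- (A only calls it with the nonempty prefix literals above)
def pvReplace1 (s old new : List Char) : List Char :=
  let i := PySem.Chars.find s old
  if i = -1 then s
  else s.take i.toNat ++ new ++ s.drop (i.toNat + old.length)

-- the for-loop over enumerate(old_headnumber): .index raising (find = -1) and
-- .index > 0 both 'continue'; .index == 0 replaces once and returns
def pvLoopA (s : List Char) : List (Int × List Char) → List Char
  | [] => s
  | (idx, h) :: rest =>
    if PySem.Chars.find s h = 0
    then pvReplace1 s h (PySem.List.pyGetD pvNew idx [])
    else pvLoopA s rest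

def standardized_phonenumbers (phone_number : String) : String :=
  String.ofList (pvLoopA phone_number.toList (PySem.List.enumerate pvOld))

-- ===== PORT B =====
-- _new_by_old3: the 21 three-digit old prefixes mapped to their replacements
def pvThree : PySem.Dict String String := PySem.Dict.mk [
  ("162", "32"), ("163", "33"), ("164", "34"), ("165", "35"), ("166", "36"),
  ("167", "37"), ("168", "38"), ("169", "39"), ("123", "83"), ("124", "84"),
  ("125", "85"), ("127", "81"), ("129", "82"), ("120", "70"), ("121", "79"),
  ("122", "77"), ("126", "76"), ("128", "78"), ("186", "56"), ("188", "58"),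
  ("199", "59")]

def standardized_phonenumbers_alt (phone_number : String) : String :=
  if PySem.Chars.startswith phone_number.toList "0".toList then
    -- tail = phone_number[1:]; v = _new_by_old3.get(tail[:3]); "0" + v + tail[3:]
    match pvThree.get? (String.ofList (PySem.Chars.slice (PySem.Chars.slice phone_number.toList (some 1) none) none (some 3))) with
    | some v => String.ofList ("0".toList ++ v.toList ++ PySem.Chars.slice (PySem.Chars.slice phone_number.toList (some 1) none) (some 3) none)
    | none => phone_number
  else
    -- v = _new_by_old3.get(phone_number[:3]); v + phone_number[3:]
    match pvThree.get? (String.ofList (PySem.Chars.slice phone_number.toList none (some 3))) with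
    | some v => String.ofList (v.toList ++ PySem.Chars.slice phone_number.toList (some 3) none)
    | none => phone_number

-- ===== PRECONDITION & SPEC =====
def Spec_standardized_phonenumbers (phone_number : String) (out : String) : Prop := out = standardized_phonenumbers_alt phone_number
instance (phone_number : String) (out : String) : Decidable (Spec_standardized_phonenumbers phone_number out) := by unfold Spec_standardized_phonenumbers; infer_instance

-- ===== CLAIM (what is proved, stated in full; the proofs are below) =====
def Claim_equal_standardized_phonenumbers : Prop := ∀ (phone_number : String), Dom_standardized_phonenumbers phone_number → Spec_standardized_phonenumbers phone_number (standardized_phonenumbers phone_number)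

-- ===== LEMMAS AND PROOFS =====

-- phone_number.index(h) == 0 says exactly: the first len(h) characters are h
lemma pv_find_eq_zero_iff (s h : List Char) : PySem.Chars.find s h = 0 ↔ s.take h.length = h := by
  constructor
  · intro h0
    have hs := PySem.Chars.find_spec (s := s) (sub := h) (by omega)
    rw [h0] at hs
    simpa using ((List.prefix_iff_eq_take.mp (by simpa using hs.1))).symm
  · intro ht
    have hp : h <+: s := List.prefix_iff_eq_take.mpr ht.symm
    have hn : 0 ≤ PySem.Chars.find s h := (PySem.Chars.find_nonneg_iff s h).mpr hp.isInfix
    have hs := PySem.Chars.find_spec (s := s) (sub := h) hn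
    rcases Nat.eq_zero_or_pos (PySem.Chars.find s h).toNat with hz | hpos
    · omega
    · exact absurd (by simpa using hp) (hs.2 0 hpos)

-- A's loop with the (prefix, replacement) pairs materialised
def pvLoopP (s : List Char) : List (List Char × List Char) → List Char
  | [] => s
  | (h, v) :: rest => if s.take h.length = h then v ++ s.drop h.length else pvLoopP s rest

lemma pvLoopA_eq_pvLoopP (s : List Char) (ps : List (Int × List Char)) :
    pvLoopA s ps = pvLoopP s (ps.map (fun p => (p.2, PySem.List.pyGetD pvNew p.1 []))) := by
  induction ps with
  | nil => rfl
  | cons p rest ih =>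
    obtain ⟨idx, h⟩ := p
    by_cases hc : PySem.Chars.find s h = 0
    · have ht := (pv_find_eq_zero_iff s h).mp hc
      simp [pvLoopA, pvLoopP, hc, ht, pvReplace1]
    · have ht := (pv_find_eq_zero_iff s h).not.mp hc
      simp [pvLoopA, pvLoopP, hc, ht, ih]

-- the 21 three-digit pairs, and the lift '0'+old ↦ '0'+new covering the 4-digit ones
def pvP3 : List (List Char × List Char) := [
  (['1', '6', '2'], ['3', '2']), (['1', '6', '3'], ['3', '3']), (['1', '6', '4'], ['3', '4']), (['1', '6', '5'], ['3', '5']), (['1', '6', '6'], ['3', '6']), (['1', '6', '7'], ['3', '7']), (['1', '6', '8'], ['3', '8']), (['1', '6', '9'], ['3', '9']), (['1', '2', '3'], ['8', '3']), (['1', '2', '4'], ['8', '4']), (['1', '2', '5'], ['8', '5']), (['1', '2', '7'], ['8', '1']), (['1', '2', '9'], ['8', '2']), (['1', '2', '0'], ['7', '0']), (['1', '2', '1'], ['7', '9']), (['1', '2', '2'], ['7', '7']), (['1', '2', '6'], ['7', '6']), (['1', '2', '8'], ['7', '8']), (['1', '8', '6'], ['5', '6']), (['1', '8', '8'], ['5',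 '8']), (['1', '9', '9'], ['5', '9'])]

def pvLift (q : List Char × List Char) : List Char × List Char := ('0' :: q.1, '0' :: q.2)

lemma pv_pairs_split :
    (PySem.List.enumerate pvOld).map (fun p => (p.2, PySem.List.pyGetD pvNew p.1 []))
      = pvP3 ++ pvP3.map pvLift := by decide

-- first-match association lookup on the pair list
def pvAssoc (x : List Char) : List (List Char × List Char) → Option (List Char)
  | [] => none
  | (k, v) :: rest => if x = k then some v else pvAssoc x rest

lemma pv_loopP_append (s : List Char) (P Q : List (List Char × List Char))
    (hP : ∀ p ∈ P, (p.1 : List Char).length = 3) :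
    pvLoopP s (P ++ Q)
      = match pvAssoc (s.take 3) P with
        | some v => v ++ s.drop 3
        | none => pvLoopP s Q := by
  induction P with
  | nil => simp [pvAssoc]
  | cons p rest ih =>
    obtain ⟨k, v⟩ := p
    have hk : k.length = 3 := hP (k, v) (by simp)
    have hrest : ∀ p ∈ rest, (p.1 : List Char).length = 3 := fun p hp => hP p (by simp [hp])
    by_cases hc : s.take 3 = k
    · simp [pvLoopP, pvAssoc, hk, hc]
    · simp [pvLoopP, pvAssoc, hk, hc, ih hrest]

lemma pv_loopP_lift_cons (t : List Char) (P : List (List Char × List Char))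
    (hP : ∀ p ∈ P, (p.1 : List Char).length = 3) :
    pvLoopP ('0' :: t) (P.map pvLift)
      = match pvAssoc (t.take 3) P with
        | some v => '0' :: (v ++ t.drop 3)
        | none => '0' :: t := by
  induction P with
  | nil => simp [pvLoopP, pvAssoc]
  | cons p rest ih =>
    obtain ⟨k, v⟩ := p
    have hk : k.length = 3 := hP (k, v) (by simp)
    have hrest : ∀ p ∈ rest, (p.1 : List Char).length = 3 := fun p hp => hP p (by simp [hp])
    by_cases hc : t.take 3 = k
    · simp [pvLoopP, pvLift, pvAssoc, hk, hc, List.take_succ_cons]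
    · have hc' : ¬ ('0' :: t.take 3 = '0' :: k) := by simp [hc]
      simp [pvLoopP, pvLift, pvAssoc, hk, hc, List.take_succ_cons, hc', ih hrest]

lemma pv_loopP_lift_no0 (s : List Char) (P : List (List Char × List Char))
    (hs : s.head? ≠ some '0') :
    pvLoopP s (P.map pvLift) = s := by
  induction P with
  | nil => rfl
  | cons p rest ih =>
    obtain ⟨k, v⟩ := p
    have hc : s.take ('0' :: k).length ≠ '0' :: k := by
      intro h
      cases s with
      | nil => simp at h
      | cons c t =>
        rw [List.length_cons, List.take_succ_cons] at h
        injection h with h1 _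
        exact hs (by simp [h1])
    simp only [List.map_cons, pvLift, pvLoopP]
    rw [if_neg hc]
    exact ih

lemma pv_assoc_p3_zero (x : List Char) : pvAssoc ('0' :: x) pvP3 = none := by
  simp [pvAssoc, pvP3]

-- bridge between B's string-keyed dict and the pair list
lemma pv_ne_key (k : String) (x : List Char) (h : ¬ x = k.toList) : ¬ (k = String.ofList x) :=
  fun hk => h (by simpa using (congrArg String.toList hk).symm)

lemma pv_three_get (x : List Char) :
    pvThree.get? (String.ofList x) = Option.map String.ofList (pvAssoc x pvP3) := by
  by_cases h0 : x = ['1', '6', '2']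
  · subst h0; decide
  by_cases h1 : x = ['1', '6', '3']
  · subst h1; decide
  by_cases h2 : x = ['1', '6', '4']
  · subst h2; decide
  by_cases h3 : x = ['1', '6', '5']
  · subst h3; decide
  by_cases h4 : x = ['1', '6', '6']
  · subst h4; decide
  by_cases h5 : x = ['1', '6', '7']
  · subst h5; decide
  by_cases h6 : x = ['1', '6', '8']
  · subst h6; decide
  by_cases h7 : x = ['1', '6', '9']
  · subst h7; decide
  by_cases h8 : x = ['1', '2', '3']
  · subst h8; decide
  by_cases h9 : x = ['1', '2', '4']
  · subst h9; decide
  by_cases h10 : x = ['1', '2', '5']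
  · subst h10; decide
  by_cases h11 : x = ['1', '2', '7']
  · subst h11; decide
  by_cases h12 : x = ['1', '2', '9']
  · subst h12; decide
  by_cases h13 : x = ['1', '2', '0']
  · subst h13; decide
  by_cases h14 : x = ['1', '2', '1']
  · subst h14; decide
  by_cases h15 : x = ['1', '2', '2']
  · subst h15; decide
  by_cases h16 : x = ['1', '2', '6']
  · subst h16; decide
  by_cases h17 : x = ['1', '2', '8']
  · subst h17; decide
  by_cases h18 : x = ['1', '8', '6']
  · subst h18; decide
  by_cases h19 : x = ['1', '8', '8']
  · subst h19; decide
  by_cases h20 : x = ['1', '9', '9']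
  · subst h20; decide
  simp [pvThree, pvP3, pvAssoc, PySem.Dict.get?, beq_iff_eq, h0, h1, h2, h3, h4, h5, h6, h7, h8, h9, h10, h11, h12, h13, h14, h15, h16, h17, h18, h19, h20, pv_ne_key "162" x (by simp [h0]), pv_ne_key "163" x (by simp [h1]), pv_ne_key "164" x (by simp [h2]), pv_ne_key "165" x (by simp [h3]), pv_ne_key "166" x (by simp [h4]), pv_ne_key "167" x (by simp [h5]), pv_ne_key "168" x (by simp [h6]), pv_ne_key "169" x (by simp [h7]), pv_ne_key "123" x (by simp [h8]), pv_ne_key "124" x (by simp [h9]), pv_ne_key "125" x (by simp [h10]), pv_ne_key "127" x (by simp [h11]), pv_ne_key "129" x (by simp [h12]), pv_ne_key "120" x (by simp [h13]), pv_ne_key "121" x (by simp [h14]), pv_ne_key "122" x (by simp [h15]), pv_ne_key "126" x (by simp [h16]), pv_ne_key "128" x (by simp [h17]), pv_ne_key "186" x (by simp [h18]), pv_ne_key "188" x (by simp [h19]), pv_ne_key "199" x (by simp [h20])]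

-- A's full loop on a string starting with '0': one lookup on the next three chars
lemma pv_A_zero (t : List Char) :
    pvLoopA ('0' :: t) (PySem.List.enumerate pvOld)
      = match pvAssoc (t.take 3) pvP3 with
        | some v => '0' :: (v ++ t.drop 3)
        | none => '0' :: t := by
  have hlen : ∀ p ∈ pvP3, (p.1 : List Char).length = 3 := by decide
  rw [pvLoopA_eq_pvLoopP, pv_pairs_split, pv_loopP_append _ _ _ hlen,
    show ('0' :: t).take 3 = '0' :: t.take 2 by simp [List.take_succ_cons],
    pv_assoc_p3_zero, pv_loopP_lift_cons t _ hlen]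

-- A's full loop on a string not starting with '0': one lookup on the first three chars
lemma pv_A_no0 (s : List Char) (hs : s.head? ≠ some '0') :
    pvLoopA s (PySem.List.enumerate pvOld)
      = match pvAssoc (s.take 3) pvP3 with
        | some v => v ++ s.drop 3
        | none => s := by
  have hlen : ∀ p ∈ pvP3, (p.1 : List Char).length = 3 := by decide
  rw [pvLoopA_eq_pvLoopP, pv_pairs_split, pv_loopP_append _ _ _ hlen]
  cases h : pvAssoc (s.take 3) pvP3 <;> simp [pv_loopP_lift_no0 _ _ hs]

-- ===== VERDICT (by name: the statement is the Claim_ definition above) =====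
theorem standardized_phonenumbers_spec : Claim_equal_standardized_phonenumbers := by
  intro p _
  unfold Spec_standardized_phonenumbers standardized_phonenumbers standardized_phonenumbers_alt
  by_cases hsw : PySem.Chars.startswith p.toList "0".toList = true
  · obtain ⟨t, ht⟩ : ∃ t, p.toList = '0' :: t := by
      have hp : ("0" : String).toList <+: p.toList := (PySem.Chars.startswith_iff _ _).mp hsw
      rw [show ("0" : String).toList = ['0'] from rfl] at hp
      cases hl : p.toList with
      | nil => rw [hl] at hp; simp at hp
      | cons c t =>
        rw [hl] at hp
        obtain ⟨hc, -⟩ := List.cons_prefix_cons.mp hp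
        exact ⟨t, by rw [← hc]⟩
    have h1 : PySem.Chars.slice ('0' :: t) (some 1) none = t := by
      simp [PySem.List.slice_from ('0' :: t) (a := 1) (by norm_num)]
    have h2 : PySem.Chars.slice t none (some 3) = t.take 3 := by
      simp [PySem.List.slice_to t (b := 3) (by norm_num)]
    have h3 : PySem.Chars.slice t (some 3) none = t.drop 3 := by
      simp [PySem.List.slice_from t (a := 3) (by norm_num)]
    rw [if_pos hsw, ht, h1, h2, h3, pv_A_zero, pv_three_get]
    cases h : pvAssoc (t.take 3) pvP3 with
    | none => simp [← ht]
    | some v => simp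
  · have hs : p.toList.head? ≠ some '0' := by
      intro hh
      apply hsw
      rw [PySem.Chars.startswith_iff, show ("0" : String).toList = ['0'] from rfl]
      cases hl : p.toList with
      | nil => rw [hl] at hh; simp at hh
      | cons c t =>
        rw [hl] at hh
        simp at hh
        simp [hh, List.cons_prefix_cons]
    have h2 : PySem.Chars.slice p.toList none (some 3) = p.toList.take 3 := by
      simp [PySem.List.slice_to p.toList (b := 3) (by norm_num)]
    have h3 : PySem.Chars.slice p.toList (some 3) none = p.toList.drop 3 := by
      simp [PySem.List.slice_from p.toList (a := 3) (by norm_num)]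
    rw [if_neg hsw, h2, h3, pv_A_no0 _ hs, pv_three_get]
    cases h : pvAssoc (p.toList.take 3) pvP3 with
    | none => simp
    | some v => simp
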